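-- pv_equiv track=rewrite | github.com/mistrjirka/WE-SHALL-PASS-ACM | ucebnica/check_the_check.py | check_rook1
-- ===== SOURCE A (Python) =====
-- def check_rook1(board, bk_coordinates):
--     dir1 = [-1, 0, 0, 1]
--     dir2 = [0, -1, 1, 0]
--
--     for i in range(len(dir1)):
--         row = bk_coordinates[0]
--         col = bk_coordinates[1]
--         while True:
--             row += dir1[i]
--             col += dir2[i]
--             if row < 0 or col < 0 or row >= 8 or col >= 8:
--                 break
--             if board[row][col] == "r":
--                 return True
--             if board[row][col] != ".":
--                 break
-- ===== SOURCE B (Python) =====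
-- def check_rook1(board, bk_coordinates):
--     kr, kc = bk_coordinates
--
--     def cell(r, c):
--         if 0 <= r < 8 and 0 <= c < 8 and r < len(board) and c < len(board[r]):
--             return board[r][c]
--         return None
--
--     for r in range(8):
--         for c in range(8):
--             if cell(r, c) == "r" and (r, c) != (kr, kc):
--                 if r == kr:
--                     lo, hi = min(c, kc), max(c, kc)
--                     if all(cell(kr, x) == "." for x in range(lo + 1, hi)):
--                         return True
--                 elif c == kc:
--                     lo, hi = min(r, kr), max(r, kr)
--                     if all(cell(x, kc) == "." for x in range(lo + 1, hi)):
--                         return True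
-- ===== Notes on version B (the rewrite author's own statement) =====
-- stated objective: alternative
-- what changed: A casts four rays outward from the king and stops at the first piece per direction; B instead scans the 64 board squares for rooks and, for each rook sharing the king's row or column, checks that every square strictly between rook and king is an on-board '.', returning True on the first clear rook and falling through to None.
-- outside the precondition, e.g. on check_rook1(['r', 'x'], (1, 0)): A returns True, B returns True
import Mathlib
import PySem

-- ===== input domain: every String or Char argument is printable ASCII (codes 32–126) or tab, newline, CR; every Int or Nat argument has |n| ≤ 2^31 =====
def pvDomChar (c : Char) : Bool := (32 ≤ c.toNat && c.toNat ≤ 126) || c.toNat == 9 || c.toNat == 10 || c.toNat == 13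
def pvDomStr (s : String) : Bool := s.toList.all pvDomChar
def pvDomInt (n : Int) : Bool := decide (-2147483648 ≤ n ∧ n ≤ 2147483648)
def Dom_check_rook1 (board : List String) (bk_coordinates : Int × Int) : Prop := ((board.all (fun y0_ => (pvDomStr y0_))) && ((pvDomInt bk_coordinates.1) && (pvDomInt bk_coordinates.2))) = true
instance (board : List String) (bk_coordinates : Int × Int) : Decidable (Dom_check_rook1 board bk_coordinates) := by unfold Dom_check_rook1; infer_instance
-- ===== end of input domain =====

-- B replaces A's four outward king-rays by a scan of the 64 squares for rooks plus a strictly-between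
-- clearness test (objective: alternative decomposition, not faster); return value equivalence only.

-- ===== PORT A =====
-- board[row][col]: both indices are nonnegative when read (the bounds check precedes the read), so the
-- pyGet? composition is exact; a missing row / short row (Python: IndexError) shows up as `none` and the
-- walk returns false there — Pre_check_rook1 excludes exactly those inputs.
def pvCellA (board : List String) (r c : Int) : Option Char :=
  (PySem.List.pyGet? board r).bind (fun s => PySem.Str.pyGet? s c)

-- A's `while True` loop: every iteration moves one step along (dr,dc), so it returns or breaks within 9
-- iterations (at most 8 in-band squares plus the breaking step); fuel 9 only makes it structural.
def pvWalkA (board : List String) (row col dr dc : Int) : Nat → Bool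
  | 0 => false
  | n+1 =>
    let row' := row + dr
    let col' := col + dc
    if row' < 0 ∨ col' < 0 ∨ 8 ≤ row' ∨ 8 ≤ col' then false
    else
      match pvCellA board row' col' with
      | none => false      -- Python raises IndexError here; outside Pre_check_rook1
      | some ch => if ch = 'r' then true else if ch ≠ '.' then false else pvWalkA board row' col' dr dc n

def check_rook1 (board : List String) (bk_coordinates : Int × Int) : Option Bool :=
  let dir1 : List Int := [-1, 0, 0, 1]
  let dir2 : List Int := [0, -1, 1, 0]
  if (List.range 4).any (fun i =>
      pvWalkA board bk_coordinates.1 bk_coordinates.2 (dir1.getD i 0) (dir2.getD i 0) 9)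
  then some true else none

-- ===== PORT B =====
-- Source B's `cell(r, c)`: the square's character for an on-board square of the 8×8 grid that the ragged
-- input actually carries, None otherwise (guard checked before the read, exactly as in Source B).
def pvCellB (board : List String) (r c : Int) : Option Char :=
  if 0 ≤ r ∧ r < 8 ∧ 0 ≤ c ∧ c < 8 ∧ r < (board.length : Int)
      ∧ c < PySem.Str.len (PySem.List.pyGetD board r "") then
    PySem.Str.pyGet? (PySem.List.pyGetD board r "") c
  else none

-- Source B's `all(cell … == "." for x in range(x0, x0+n))`: the generator is lazy, so this recursion takes
-- the range LENGTH as fuel and stops at the first square that is not an on-board '.' .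
def pvClear (cell : Int → Option Char) : Nat → Int → Bool
  | 0, _ => true
  | n+1, x => if cell x = some '.' then pvClear cell n (x+1) else false

def check_rook1_alt (board : List String) (bk_coordinates : Int × Int) : Option Bool :=
  let kr := bk_coordinates.1
  let kc := bk_coordinates.2
  if (List.range 8).any (fun r => (List.range 8).any (fun c =>
      pvCellB board r c == some 'r' && !((r : Int) == kr && (c : Int) == kc) &&
      (if (r : Int) = kr then
         pvClear (fun x => pvCellB board kr x) (max (c:Int) kc - (min (c:Int) kc + 1)).toNat (min (c:Int) kc + 1)
       else if (c : Int) = kc then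
         pvClear (fun x => pvCellB board x kc) (max (r:Int) kr - (min (r:Int) kr + 1)).toNat (min (r:Int) kr + 1)
       else false)))
  then some true else none

-- ===== PRECONDITION & SPEC =====
-- A raises IndexError exactly when, in some of the four rook directions, a straight run of '.' squares
-- from the king inside the 8×8 bounds ends at a square the ragged board does not carry; Pre_ excludes
-- those inputs (it also excludes the rare boards where an earlier direction already returned True before
-- the raising direction was tried — there A returns True and B returns True as well, see the cite).
def Pre_check_rook1 (board : List String) (bk_coordinates : Int × Int) : Prop :=
  ∀ d ∈ [((-1 : Int), (0 : Int)), (0, -1), (0, 1), (1, 0)], ∀ k ∈ List.range 9, 1 ≤ k →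
    (∀ j ∈ List.range 9, 1 ≤ j → j ≤ k →
        0 ≤ bk_coordinates.1 + j * d.1 ∧ bk_coordinates.1 + j * d.1 < 8 ∧
        0 ≤ bk_coordinates.2 + j * d.2 ∧ bk_coordinates.2 + j * d.2 < 8) →
    (∀ j ∈ List.range 9, 1 ≤ j → j < k →
        pvCellA board (bk_coordinates.1 + j * d.1) (bk_coordinates.2 + j * d.2) = some '.') →
    pvCellA board (bk_coordinates.1 + k * d.1) (bk_coordinates.2 + k * d.2) ≠ none

instance (board : List String) (bk_coordinates : Int × Int) : Decidable (Pre_check_rook1 board bk_coordinates) := by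
  unfold Pre_check_rook1; infer_instance

def pvWitness_check_rook1 : List String × (Int × Int) :=
  (["........", "........", "....r...", "........", "........", "........", "........", "........"], (4, 4))

def Spec_check_rook1 (board : List String) (bk_coordinates : Int × Int) (out : Option Bool) : Prop := out = check_rook1_alt board bk_coordinates
instance (board : List String) (bk_coordinates : Int × Int) (out : Option Bool) : Decidable (Spec_check_rook1 board bk_coordinates out) := by unfold Spec_check_rook1; infer_instance

-- ===== CLAIM (what is proved, stated in full; the proofs are below) =====
def Claim_equal_check_rook1 : Prop := ∀ (board : List String) (bk_coordinates : Int × Int), Dom_check_rook1 board bk_coordinates → Pre_check_rook1 board bk_coordinates → Spec_check_rook1 board bk_coordinates (check_rook1 board bk_coordinates)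


-- ===== LEMMAS AND PROOFS =====

-- the 8×8 band (proof-side shorthand)
def pvInB (r c : Int) : Prop := 0 ≤ r ∧ r < 8 ∧ 0 ≤ c ∧ c < 8

-- pvCellB is pvCellA restricted to the 8×8 band
theorem pvCellB_eq_of_inB (board : List String) (r c : Int) (h : pvInB r c) :
    pvCellB board r c = pvCellA board r c := by
  obtain ⟨h1, h2, h3, h4⟩ := h
  unfold pvCellB pvCellA
  by_cases hr : r < (board.length : Int)
  · have hrn : r.toNat < board.length := by omega
    have hg : PySem.List.pyGet? board r = some board[r.toNat] := by
      rw [PySem.List.pyGet?_of_nonneg _ h1]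
      simp [List.getElem?_eq_getElem hrn]
    have hgD : PySem.List.pyGetD board r "" = board[r.toNat] := by
      rw [PySem.List.pyGetD_eq_getElem _ _ h1 hr]
    by_cases hc : c < PySem.Str.len (PySem.List.pyGetD board r "")
    · rw [if_pos ⟨h1, h2, h3, h4, hr, hc⟩, hg, hgD]
      rfl
    · rw [if_neg (by tauto), hg]
      have hlen : ((board[r.toNat]).toList.length : Int) ≤ c := by
        rw [hgD] at hc
        rw [PySem.Str.len_eq] at hc
        omega
      have hnone : PySem.List.pyGet? (board[r.toNat]).toList c = none := by
        rw [PySem.List.pyGet?_eq_none_iff]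
        unfold PySem.Raise.InRange
        omega
      simp [PySem.Str.pyGet?, PySem.Chars.pyGet?, hnone]
  · rw [if_neg (by tauto)]
    have : PySem.List.pyGet? board r = none := by
      rw [PySem.List.pyGet?_eq_none_iff]
      unfold PySem.Raise.InRange
      omega
    simp [this]

theorem pvCellB_some_inB (board : List String) (r c : Int) (ch : Char)
    (h : pvCellB board r c = some ch) : pvInB r c := by
  unfold pvCellB at h
  split at h
  · rename_i hg
    exact ⟨hg.1, hg.2.1, hg.2.2.1, hg.2.2.2.1⟩
  · exact absurd h (by simp)

-- position shifts used while unrolling the walk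
theorem pvShift_succ (a d' : Int) (j : Nat) : a + d' + (j : Int) * d' = a + ((j + 1 : Nat) : Int) * d' := by
  push_cast; ring

theorem pvShift_pred (a d' : Int) (j : Nat) (hj : 1 ≤ j) :
    a + d' + ((j - 1 : Nat) : Int) * d' = a + (j : Int) * d' := by
  rw [Nat.cast_sub hj]; push_cast; ring

-- characterisation of A's directional walk
theorem pvWalkA_iff (board : List String) (dr dc : Int) (fuel : Nat) :
    ∀ row col : Int, (pvWalkA board row col dr dc fuel = true ↔
      ∃ k : Nat, 1 ≤ k ∧ k ≤ fuel ∧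
        (∀ j : Nat, 1 ≤ j → j ≤ k → pvInB (row + j * dr) (col + j * dc)) ∧
        (∀ j : Nat, 1 ≤ j → j < k → pvCellA board (row + j * dr) (col + j * dc) = some '.') ∧
        pvCellA board (row + k * dr) (col + k * dc) = some 'r') := by
  induction fuel with
  | zero =>
    intro row col
    simp only [pvWalkA, Bool.false_eq_true, false_iff]
    rintro ⟨k, hk1, hk0, -⟩
    omega
  | succ n ih =>
    intro row col
    show (if row + dr < 0 ∨ col + dc < 0 ∨ 8 ≤ row + dr ∨ 8 ≤ col + dc then false
          else match pvCellA board (row + dr) (col + dc) with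
            | none => false
            | some ch => if ch = 'r' then true else if ch ≠ '.' then false
                else pvWalkA board (row + dr) (col + dc) dr dc n) = true ↔ _
    by_cases hob : row + dr < 0 ∨ col + dc < 0 ∨ 8 ≤ row + dr ∨ 8 ≤ col + dc
    · rw [if_pos hob]
      simp only [Bool.false_eq_true, false_iff]
      rintro ⟨k, hk1, hkn, hb, -, -⟩
      have h1 := hb 1 le_rfl hk1
      unfold pvInB at h1
      push_cast [one_mul] at h1
      omega
    · rw [if_neg hob]
      simp only [not_or, not_lt, not_le] at hob
      cases hcell : pvCellA board (row + dr) (col + dc) with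
      | none =>
        simp only [Bool.false_eq_true, false_iff]
        rintro ⟨k, hk1, hkn, hb, hd, hrk⟩
        rcases Nat.lt_or_ge 1 k with hk2 | hk2
        · have := hd 1 le_rfl hk2
          push_cast [one_mul] at this
          rw [hcell] at this
          exact absurd this (by simp)
        · have hke : k = 1 := by omega
          subst hke
          push_cast [one_mul] at hrk
          rw [hcell] at hrk
          exact absurd hrk (by simp)
      | some ch =>
        dsimp only
        by_cases hch : ch = 'r'
        · subst hch
          rw [if_pos rfl]
          constructor
          · intro _
            refine ⟨1, le_rfl, by omega, ?_, by omega, by push_cast [one_mul]; exact hcell⟩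
            intro j hj1 hjk
            have hje : j = 1 := by omega
            subst hje
            unfold pvInB
            push_cast [one_mul]
            omega
          · intro _
            rfl
        · rw [if_neg hch]
          by_cases hdot : ch = '.'
          · subst hdot
            rw [if_neg (by simp)]
            rw [ih (row + dr) (col + dc)]
            constructor
            · rintro ⟨k, hk1, hkn, hb, hd, hrk⟩
              refine ⟨k + 1, by omega, by omega, ?_, ?_, ?_⟩
              · intro j hj1 hjk
                rcases Nat.eq_or_lt_of_le hj1 with hje | hj2
                · subst hje
                  unfold pvInB
                  push_cast [one_mul]
                  omega
                · have := hb (j - 1) (by omega) (by omega)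
                  rwa [pvShift_pred row dr j (by omega), pvShift_pred col dc j (by omega)] at this
              · intro j hj1 hjk
                rcases Nat.eq_or_lt_of_le hj1 with hje | hj2
                · subst hje
                  push_cast [one_mul]
                  exact hcell
                · have := hd (j - 1) (by omega) (by omega)
                  rwa [pvShift_pred row dr j (by omega), pvShift_pred col dc j (by omega)] at this
              · have : (k + 1 : Nat) - 1 = k := by omega
                rw [← pvShift_pred row dr (k + 1) (by omega), ← pvShift_pred col dc (k + 1) (by omega), this]
                exact hrk
            · rintro ⟨k, hk1, hkn, hb, hd, hrk⟩
              have hk2 : 2 ≤ k := by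
                by_contra hk2
                have hke : k = 1 := by omega
                subst hke
                push_cast [one_mul] at hrk
                rw [hcell] at hrk
                simp at hrk
              refine ⟨k - 1, by omega, by omega, ?_, ?_, ?_⟩
              · intro j hj1 hjk
                have := hb (j + 1) (by omega) (by omega)
                rwa [← pvShift_succ row dr j, ← pvShift_succ col dc j] at this
              · intro j hj1 hjk
                have := hd (j + 1) (by omega) (by omega)
                rwa [← pvShift_succ row dr j, ← pvShift_succ col dc j] at this
              · rw [pvShift_pred row dr k (by omega), pvShift_pred col dc k (by omega)]
                exact hrk
          · rw [if_pos hdot]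
            simp only [Bool.false_eq_true, false_iff]
            rintro ⟨k, hk1, hkn, hb, hd, hrk⟩
            rcases Nat.lt_or_ge 1 k with hk2 | hk2
            · have := hd 1 le_rfl hk2
              push_cast [one_mul] at this
              rw [hcell] at this
              simp at this
              exact hdot this
            · have hke : k = 1 := by omega
              subst hke
              push_cast [one_mul] at hrk
              rw [hcell] at hrk
              simp at hrk
              exact hch hrk

-- characterisation of B's lazy between-squares scan
theorem pvClear_iff (cell : Int → Option Char) (n : Nat) :
    ∀ x : Int, (pvClear cell n x = true ↔ ∀ y : Int, x ≤ y → y < x + n → cell y = some '.') := by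
  induction n with
  | zero =>
    intro x
    simp only [pvClear, true_iff]
    intro y h1 h2
    omega
  | succ n ih =>
    intro x
    show (if cell x = some '.' then pvClear cell n (x + 1) else false) = true ↔ _
    by_cases hx : cell x = some '.'
    · rw [if_pos hx, ih (x + 1)]
      constructor
      · intro h y h1 h2
        rcases eq_or_lt_of_le h1 with he | h1'
        · rw [← he]; exact hx
        · exact h y (by omega) (by push_cast at h2; omega)
      · intro h y h1 h2
        exact h y (by omega) (by omega)
    · rw [if_neg hx]
      simp only [Bool.false_eq_true, false_iff]
      intro h
      exact hx (h x le_rfl (by omega))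

-- B's fuel is exactly the length of range(lo+1, hi): the scan says "every strictly-between square is a dot"
theorem pvClear_between (cell : Int → Option Char) (a b : Int) :
    (pvClear cell (max a b - (min a b + 1)).toNat (min a b + 1) = true ↔
      ∀ x : Int, min a b < x → x < max a b → cell x = some '.') := by
  rw [pvClear_iff]
  constructor
  · intro h x h1 h2
    exact h x (by omega) (by omega)
  · intro h y h1 h2
    exact h y (by omega) (by omega)

-- one line of the board: a ray in both senses hits a clear rook iff some rook on the line sees the king
def pvRay (cell : Int → Option Char) (t d : Int) : Prop :=
  ∃ k : Nat, 1 ≤ k ∧ (∀ j : Nat, 1 ≤ j → j < k → cell (t + j * d) = some '.') ∧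
    cell (t + k * d) = some 'r'

theorem pvLine_bridge (cell : Int → Option Char) (t : Int) :
    (pvRay cell t 1 ∨ pvRay cell t (-1)) ↔
      ∃ p : Int, cell p = some 'r' ∧ p ≠ t ∧
        (∀ x : Int, min p t < x → x < max p t → cell x = some '.') := by
  constructor
  · rintro (⟨k, hk1, hd, hr⟩ | ⟨k, hk1, hd, hr⟩)
    · refine ⟨t + (k : Int), by simpa [mul_one] using hr, by omega, ?_⟩
      intro x h1 h2
      rw [max_eq_left (by omega : t ≤ t + (k : Int))] at h2
      rw [min_eq_right (by omega : t ≤ t + (k : Int))] at h1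
      have := hd (x - t).toNat (by omega) (by omega)
      have e : t + ((x - t).toNat : Int) * 1 = x := by
        rw [Int.toNat_of_nonneg (by omega)]; ring
      rwa [e] at this
    · refine ⟨t - (k : Int), ?_, by omega, ?_⟩
      · have e : t + (k : Int) * (-1) = t - (k : Int) := by ring
        rwa [e] at hr
      · intro x h1 h2
        rw [max_eq_right (by omega : t - (k : Int) ≤ t)] at h2
        rw [min_eq_left (by omega : t - (k : Int) ≤ t)] at h1
        have := hd (t - x).toNat (by omega) (by omega)
        have e : t + ((t - x).toNat : Int) * (-1) = x := by
          rw [Int.toNat_of_nonneg (by omega)]; ring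
        rwa [e] at this
  · rintro ⟨p, hr, hne, hbet⟩
    rcases lt_or_gt_of_ne hne with hlt | hgt
    · right
      refine ⟨(t - p).toNat, by omega, ?_, ?_⟩
      · intro j hj1 hjk
        have e : t + (j : Int) * (-1) = t - (j : Int) := by ring
        rw [e]
        apply hbet
        · rw [min_eq_left hlt.le]; omega
        · rw [max_eq_right hlt.le]; omega
      · have e : t + ((t - p).toNat : Int) * (-1) = p := by
          rw [Int.toNat_of_nonneg (by omega)]; ring
        rwa [e]
    · left
      refine ⟨(p - t).toNat, by omega, ?_, ?_⟩
      · intro j hj1 hjk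
        have e : t + (j : Int) * 1 = t + (j : Int) := by ring
        rw [e]
        apply hbet
        · rw [min_eq_right hgt.le]; omega
        · rw [max_eq_left hgt.le]; omega
      · have e : t + ((p - t).toNat : Int) * 1 = p := by
          rw [Int.toNat_of_nonneg (by omega)]; ring
        rwa [e]

-- walks along one row / one column, phrased on B's cell function
theorem pvWalk_ray_row (board : List String) (kr kc d : Int) (hd : d = 1 ∨ d = -1) :
    pvWalkA board kr kc 0 d 9 = true ↔ pvRay (fun x => pvCellB board kr x) kc d := by
  rw [pvWalkA_iff]
  constructor
  · rintro ⟨k, hk1, hk9, hb, hdots, hr⟩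
    simp only [mul_zero, add_zero] at hb hdots hr
    refine ⟨k, hk1, ?_, ?_⟩
    · intro j hj1 hjk
      dsimp only
      rw [pvCellB_eq_of_inB _ _ _ (hb j hj1 (by omega))]
      exact hdots j hj1 hjk
    · dsimp only
      rw [pvCellB_eq_of_inB _ _ _ (hb k (by omega) le_rfl)]
      exact hr
  · rintro ⟨k, hk1, hdots, hr⟩
    have hbk : pvInB kr (kc + (k : Int) * d) := pvCellB_some_inB _ _ _ _ hr
    have hball : ∀ j : Nat, 1 ≤ j → j ≤ k → pvInB kr (kc + (j : Int) * d) := by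
      intro j hj1 hjk
      rcases Nat.eq_or_lt_of_le hjk with hje | hjlt
      · rw [hje]; exact hbk
      · exact pvCellB_some_inB _ _ _ _ (hdots j hj1 hjlt)
    have hb1 := hball 1 le_rfl hk1
    have hk9 : k ≤ 9 := by
      unfold pvInB at hbk hb1
      rcases hd with hde | hde <;> rw [hde] at hbk hb1 <;> push_cast [one_mul] at hbk hb1 <;> omega
    refine ⟨k, hk1, hk9, ?_, ?_, ?_⟩
    · intro j hj1 hjk
      simp only [mul_zero, add_zero]
      exact hball j hj1 hjk
    · intro j hj1 hjk
      simp only [mul_zero, add_zero]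
      rw [← pvCellB_eq_of_inB _ _ _ (hball j hj1 (by omega))]
      exact hdots j hj1 hjk
    · simp only [mul_zero, add_zero]
      rw [← pvCellB_eq_of_inB _ _ _ hbk]
      exact hr

theorem pvWalk_ray_col (board : List String) (kr kc d : Int) (hd : d = 1 ∨ d = -1) :
    pvWalkA board kr kc d 0 9 = true ↔ pvRay (fun x => pvCellB board x kc) kr d := by
  rw [pvWalkA_iff]
  constructor
  · rintro ⟨k, hk1, hk9, hb, hdots, hr⟩
    simp only [mul_zero, add_zero] at hb hdots hr
    refine ⟨k, hk1, ?_, ?_⟩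
    · intro j hj1 hjk
      dsimp only
      rw [pvCellB_eq_of_inB _ _ _ (hb j hj1 (by omega))]
      exact hdots j hj1 hjk
    · dsimp only
      rw [pvCellB_eq_of_inB _ _ _ (hb k (by omega) le_rfl)]
      exact hr
  · rintro ⟨k, hk1, hdots, hr⟩
    have hbk : pvInB (kr + (k : Int) * d) kc := pvCellB_some_inB _ _ _ _ hr
    have hball : ∀ j : Nat, 1 ≤ j → j ≤ k → pvInB (kr + (j : Int) * d) kc := by
      intro j hj1 hjk
      rcases Nat.eq_or_lt_of_le hjk with hje | hjlt
      · rw [hje]; exact hbk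
      · exact pvCellB_some_inB _ _ _ _ (hdots j hj1 hjlt)
    have hb1 := hball 1 le_rfl hk1
    have hk9 : k ≤ 9 := by
      unfold pvInB at hbk hb1
      rcases hd with hde | hde <;> rw [hde] at hbk hb1 <;> push_cast [one_mul] at hbk hb1 <;> omega
    refine ⟨k, hk1, hk9, ?_, ?_, ?_⟩
    · intro j hj1 hjk
      simp only [mul_zero, add_zero]
      exact hball j hj1 hjk
    · intro j hj1 hjk
      simp only [mul_zero, add_zero]
      rw [← pvCellB_eq_of_inB _ _ _ (hball j hj1 (by omega))]
      exact hdots j hj1 hjk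
    · simp only [mul_zero, add_zero]
      rw [← pvCellB_eq_of_inB _ _ _ hbk]
      exact hr

-- B's square scan, characterised as "some rook sees the king along its row or its column"
theorem pvB_iff (board : List String) (kr kc : Int) :
    ((List.range 8).any (fun r => (List.range 8).any (fun c =>
      pvCellB board r c == some 'r' && !((r : Int) == kr && (c : Int) == kc) &&
      (if (r : Int) = kr then
         pvClear (fun x => pvCellB board kr x) (max (c:Int) kc - (min (c:Int) kc + 1)).toNat (min (c:Int) kc + 1)
       else if (c : Int) = kc then
         pvClear (fun x => pvCellB board x kc) (max (r:Int) kr - (min (r:Int) kr + 1)).toNat (min (r:Int) kr + 1)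
       else false))) = true) ↔
    ((∃ p : Int, pvCellB board kr p = some 'r' ∧ p ≠ kc ∧
        (∀ x : Int, min p kc < x → x < max p kc → pvCellB board kr x = some '.')) ∨
     (∃ p : Int, pvCellB board p kc = some 'r' ∧ p ≠ kr ∧
        (∀ x : Int, min p kr < x → x < max p kr → pvCellB board x kc = some '.'))) := by
  rw [List.any_eq_true]
  constructor
  · rintro ⟨r, -, hr⟩
    rw [List.any_eq_true] at hr
    obtain ⟨c, -, hc⟩ := hr
    simp only [Bool.and_eq_true, beq_iff_eq, Bool.not_eq_true', Bool.and_eq_false_iff,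
      beq_eq_false_iff_ne, ne_eq] at hc
    obtain ⟨⟨hcell, hnk⟩, hif⟩ := hc
    by_cases hrk : (r : Int) = kr
    · left
      rw [if_pos hrk] at hif
      refine ⟨(c : Int), by rw [← hrk]; exact hcell, ?_, (pvClear_between _ _ _).mp hif⟩
      intro he
      rcases hnk with h | h
      · exact h hrk
      · exact h he
    · right
      rw [if_neg hrk] at hif
      by_cases hck : (c : Int) = kc
      · rw [if_pos hck] at hif
        exact ⟨(r : Int), by rw [← hck]; exact hcell, hrk, (pvClear_between _ _ _).mp hif⟩
      · rw [if_neg hck] at hif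
        exact absurd hif (by simp)
  · rintro (⟨p, hcell, hne, hbet⟩ | ⟨p, hcell, hne, hbet⟩)
    · have hin := pvCellB_some_inB _ _ _ _ hcell
      obtain ⟨hkr0, hkr8, hp0, hp8⟩ := hin
      refine ⟨kr.toNat, by simp [List.mem_range]; omega, ?_⟩
      rw [List.any_eq_true]
      refine ⟨p.toNat, by simp [List.mem_range]; omega, ?_⟩
      have ekr : ((kr.toNat : Int)) = kr := Int.toNat_of_nonneg hkr0
      have ep : ((p.toNat : Int)) = p := Int.toNat_of_nonneg hp0
      simp only [Bool.and_eq_true, beq_iff_eq, Bool.not_eq_true', Bool.and_eq_false_iff,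
        beq_eq_false_iff_ne, ne_eq, ekr, ep]
      refine ⟨⟨hcell, Or.inr (by omega)⟩, ?_⟩
      rw [if_pos trivial]
      exact (pvClear_between _ _ _).mpr hbet
    · have hin := pvCellB_some_inB _ _ _ _ hcell
      obtain ⟨hp0, hp8, hkc0, hkc8⟩ := hin
      refine ⟨p.toNat, by simp [List.mem_range]; omega, ?_⟩
      rw [List.any_eq_true]
      refine ⟨kc.toNat, by simp [List.mem_range]; omega, ?_⟩
      have ekc : ((kc.toNat : Int)) = kc := Int.toNat_of_nonneg hkc0
      have ep : ((p.toNat : Int)) = p := Int.toNat_of_nonneg hp0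
      simp only [Bool.and_eq_true, beq_iff_eq, Bool.not_eq_true', Bool.and_eq_false_iff,
        beq_eq_false_iff_ne, ne_eq, ekc, ep]
      refine ⟨⟨hcell, Or.inl (by omega)⟩, ?_⟩
      rw [if_neg (by omega), if_pos trivial]
      exact (pvClear_between _ _ _).mpr hbet

theorem check_rook1_eq_alt (board : List String) (bk : Int × Int) :
    check_rook1 board bk = check_rook1_alt board bk := by
  simp only [check_rook1, check_rook1_alt]
  have key :
      ((List.range 4).any (fun i =>
        pvWalkA board bk.1 bk.2 (([-1, 0, 0, 1] : List Int).getD i 0)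
          (([0, -1, 1, 0] : List Int).getD i 0) 9) = true) ↔
      ((List.range 8).any (fun r => (List.range 8).any (fun c =>
        pvCellB board r c == some 'r' && !((r : Int) == bk.1 && (c : Int) == bk.2) &&
        (if (r : Int) = bk.1 then
           pvClear (fun x => pvCellB board bk.1 x) (max (c:Int) bk.2 - (min (c:Int) bk.2 + 1)).toNat (min (c:Int) bk.2 + 1)
         else if (c : Int) = bk.2 then
           pvClear (fun x => pvCellB board x bk.2) (max (r:Int) bk.1 - (min (r:Int) bk.1 + 1)).toNat (min (r:Int) bk.1 + 1)
         else false))) = true) := by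
    rw [pvB_iff board bk.1 bk.2]
    rw [show List.range 4 = [0, 1, 2, 3] from rfl]
    simp only [List.any_cons, List.any_nil, Bool.or_eq_true, Bool.or_false]
    rw [show (([-1, 0, 0, 1] : List Int).getD 0 0) = -1 from rfl,
        show (([-1, 0, 0, 1] : List Int).getD 1 0) = 0 from rfl,
        show (([-1, 0, 0, 1] : List Int).getD 2 0) = 0 from rfl,
        show (([-1, 0, 0, 1] : List Int).getD 3 0) = 1 from rfl,
        show (([0, -1, 1, 0] : List Int).getD 0 0) = 0 from rfl,
        show (([0, -1, 1, 0] : List Int).getD 1 0) = -1 from rfl,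
        show (([0, -1, 1, 0] : List Int).getD 2 0) = 1 from rfl,
        show (([0, -1, 1, 0] : List Int).getD 3 0) = 0 from rfl]
    rw [pvWalk_ray_col board bk.1 bk.2 (-1) (Or.inr rfl),
        pvWalk_ray_row board bk.1 bk.2 (-1) (Or.inr rfl),
        pvWalk_ray_row board bk.1 bk.2 1 (Or.inl rfl),
        pvWalk_ray_col board bk.1 bk.2 1 (Or.inl rfl),
        ← pvLine_bridge (fun x => pvCellB board bk.1 x) bk.2,
        ← pvLine_bridge (fun x => pvCellB board x bk.2) bk.1]
    tauto
  split
  · rename_i hA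
    rw [if_pos (key.mp hA)]
  · rename_i hA
    rw [if_neg (fun hB => hA (key.mpr hB))]

-- ===== VERDICT (by name: the statement is the Claim_ definition above) =====
theorem check_rook1_spec : Claim_equal_check_rook1 := by
  intro board bk _ _
  unfold Spec_check_rook1
  exact check_rook1_eq_alt board bk
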